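-- pv_equiv track=rewrite | github.com/aaman007/py-dumps | ctci/bit_manipulation/flip_bit_to_win.py | count_contiguous
-- ===== SOURCE A (Python) =====
-- def count_contiguous(number):
--     mx, count = 0, 0
--     for bit in range(32):
--         if number & (1 << bit):
--             count += 1
--             mx = max(count, mx)
--         else:
--             count = 0
--     return mx
-- ===== SOURCE B (Python) =====
-- def count_contiguous(number):
--     n = number & 0xFFFFFFFF
--     count = 0
--     while n:
--         n &= n >> 1
--         count += 1
--     return count
-- ===== Notes on version B (the rewrite author's own statement) =====
-- stated objective: idiomatic
-- what changed: Replaces the fixed 32-iteration per-bit scan with (max, run) state by the bit-folding idiom: mask to 32 bits, then repeatedly AND n with n >> 1 (each step shortens every run of 1s by one bit) and count the iterations until n is 0.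
import Mathlib
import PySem

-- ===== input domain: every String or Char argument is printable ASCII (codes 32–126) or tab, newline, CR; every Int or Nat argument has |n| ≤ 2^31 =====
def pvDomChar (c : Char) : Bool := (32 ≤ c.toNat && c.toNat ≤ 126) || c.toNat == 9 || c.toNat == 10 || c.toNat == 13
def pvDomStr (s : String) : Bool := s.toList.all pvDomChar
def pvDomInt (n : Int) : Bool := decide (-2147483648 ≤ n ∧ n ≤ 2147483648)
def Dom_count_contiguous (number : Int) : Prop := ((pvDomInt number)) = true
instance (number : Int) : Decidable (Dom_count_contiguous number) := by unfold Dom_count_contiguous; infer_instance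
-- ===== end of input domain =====

-- B replaces A's fixed 32-step per-bit scan by the bit-folding idiom (mask to 32 bits,
-- then repeat n &= n >> 1 counting iterations) — a more idiomatic, data-driven loop.


-- ===== PORT A =====
-- for bit in range(32): if number & (1 << bit): count += 1; mx = max(count, mx) else: count = 0
def count_contiguous (number : Int) : Int :=
  (((List.range 32).foldl
      (fun (st : Int × Int) (bit : Nat) =>
        if PySem.Int.band number ((1 : Int) <<< bit) ≠ 0 then
          (max (st.2 + 1) st.1, st.2 + 1)
        else
          (st.1, 0))
      (0, 0))).1

-- ===== PORT B =====
-- while n: n &= n >> 1; count += 1   — n = number & 0xFFFFFFFF is nonnegative, so the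
-- loop state is carried as a Nat (Nat's &&& / >>> agree with Python's on nonnegative ints)
def bitFold (n : Nat) : Nat :=
  if n = 0 then 0 else bitFold (n &&& (n >>> 1)) + 1
termination_by n
decreasing_by
  rename_i h
  calc n &&& (n >>> 1) ≤ n >>> 1 := Nat.and_le_right
    _ = n / 2 := by simp [Nat.shiftRight_succ, Nat.shiftRight_zero]
    _ < n := Nat.div_lt_self (Nat.pos_of_ne_zero h) (by omega)

def count_contiguous_alt (number : Int) : Int :=
  ((bitFold (PySem.Int.band number 4294967295).toNat : Nat) : Int)

-- ===== PRECONDITION & SPEC =====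
def Spec_count_contiguous (number : Int) (out : Int) : Prop := out = count_contiguous_alt number
instance (number : Int) (out : Int) : Decidable (Spec_count_contiguous number out) := by unfold Spec_count_contiguous; infer_instance

-- ===== CLAIM (what is proved, stated in full; the proofs are below) =====
def Claim_equal_count_contiguous : Prop := ∀ (number : Int), Dom_count_contiguous number → Spec_count_contiguous number (count_contiguous number)

-- ===== LEMMAS AND PROOFS =====

-- disjoint decomposition of b into its (b &&& n) and (b ldiff n) parts
lemma pv_and_add_ldiff (b n : Nat) : (b &&& n) + b.ldiff n = b := by
  induction b using Nat.binaryRec generalizing n with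
  | zero =>
    have h0 : Nat.ldiff 0 n = 0 := Nat.eq_of_testBit_eq (by simp [Nat.testBit_ldiff])
    simp [h0]
  | bit a m ih =>
    induction n using Nat.bitCasesOn with
    | bit c n' =>
      rw [Nat.land_bit, Nat.ldiff_bit]
      have h := ih n'
      cases a <;> cases c <;>
        simp only [Nat.bit_val, Bool.and_true, Bool.and_false, Bool.not_true, Bool.not_false,
          Bool.toNat_true, Bool.toNat_false] <;> omega

-- value of PySem.Int.band with a negative left and Nat right operand
lemma pv_band_negSucc (n b : Nat) :
    PySem.Int.band (Int.negSucc n) (b : Int) = ((b.ldiff n : Nat) : Int) := by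
  have h1 : ¬ (0 ≤ Int.negSucc n) := by simp [Int.negSucc_eq]; omega
  have h2 : (-(Int.negSucc n) - 1).toNat = n := by simp [Int.negSucc_eq]
  unfold PySem.Int.band
  rw [if_neg h1, if_pos (Int.natCast_nonneg b), h2, Int.toNat_natCast]
  have := pv_and_add_ldiff b n
  have hle : b &&& n ≤ b := Nat.and_le_left
  congr 1
  omega

-- PySem.Int.band with a Nat right operand, bit by bit
lemma pv_band_toNat_testBit (a : Int) (b i : Nat) :
    ((PySem.Int.band a (b : Int)).toNat).testBit i = (a.testBit i && b.testBit i) := by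
  cases a with
  | ofNat n =>
    show ((PySem.Int.band (n : Int) (b : Int)).toNat).testBit i = _
    rw [PySem.Int.band_of_nonneg (Int.natCast_nonneg n) (Int.natCast_nonneg b)]
    simp [Int.testBit]
  | negSucc n =>
    rw [pv_band_negSucc, Int.toNat_natCast, Nat.testBit_ldiff]
    simp [Int.testBit, Bool.and_comm]

-- the band with a Nat mask is bounded by the mask
lemma pv_band_toNat_le (a : Int) (b : Nat) : (PySem.Int.band a (b : Int)).toNat ≤ b := by
  cases a with
  | ofNat n =>
    show (PySem.Int.band (n : Int) (b : Int)).toNat ≤ b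
    rw [PySem.Int.band_of_nonneg (Int.natCast_nonneg n) (Int.natCast_nonneg b)]
    exact le_trans (le_of_eq (Int.toNat_natCast _)) Nat.and_le_right
  | negSucc n =>
    rw [pv_band_negSucc, Int.toNat_natCast]
    have := pv_and_add_ldiff b n
    omega

-- the masked value m = number & 0xFFFFFFFF
def pvM (number : Int) : Nat := (PySem.Int.band number 4294967295).toNat

lemma pv_mask_cast : ((4294967295 : Nat) : Int) = (4294967295 : Int) := by norm_num

lemma pvM_testBit (number : Int) (i : Nat) :
    (pvM number).testBit i = (number.testBit i && decide (i < 32)) := by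
  have h := pv_band_toNat_testBit number 4294967295 i
  rw [pv_mask_cast] at h
  rw [pvM, h, show (4294967295 : Nat) = 2 ^ 32 - 1 by norm_num, Nat.testBit_two_pow_sub_one]

lemma pvM_lt (number : Int) : pvM number < 2 ^ 32 := by
  have h := pv_band_toNat_le number 4294967295
  rw [pv_mask_cast] at h
  rw [pvM]
  omega

-- A's branch condition, in terms of the bits of the masked value
lemma pv_test (number : Int) (bit : Nat) (hbit : bit < 32) :
    (PySem.Int.band number ((1 : Int) <<< bit) ≠ 0) ↔ (pvM number).testBit bit = true := by
  have hpow : ((1 : Int) <<< bit) = ((2 ^ bit : Nat) : Int) := by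
    rw [Int.shiftLeft_eq]; push_cast; ring
  have hnn' : 0 ≤ PySem.Int.band number ((2 ^ bit : Nat) : Int) := by
    rw [PySem.Int.band_comm]
    exact PySem.Int.band_nonneg_of_nonneg_left number (Int.natCast_nonneg (2 ^ bit))
  have htb := fun j => pv_band_toNat_testBit number (2 ^ bit) j
  rw [hpow, pvM_testBit, decide_eq_true (by omega : bit < 32), Bool.and_true]
  constructor
  · intro hne
    by_contra hb
    have hzero : (PySem.Int.band number ((2 ^ bit : Nat) : Int)).toNat = 0 := by
      apply Nat.eq_of_testBit_eq
      intro j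
      rw [htb j, Nat.zero_testBit, Nat.testBit_two_pow]
      rcases eq_or_ne bit j with rfl | hne'
      · simp [Bool.eq_false_iff.mpr hb]
      · simp [hne']
    omega
  · intro hb hz
    have h0 : (PySem.Int.band number ((2 ^ bit : Nat) : Int)).toNat = 0 := by rw [hz]; rfl
    have h1 := htb bit
    rw [h0, Nat.zero_testBit, Nat.testBit_two_pow] at h1
    simp [hb] at h1

-- A-side state functions: current run length and running maximum over bits [0, k)
def pvCC (m : Nat) : Nat → Nat
  | 0 => 0
  | k + 1 => if m.testBit k then pvCC m k + 1 else 0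

def pvMX (m : Nat) : Nat → Nat
  | 0 => 0
  | k + 1 => if m.testBit k then max (pvCC m k + 1) (pvMX m k) else pvMX m k

lemma pv_foldA (number : Int) (k : Nat) (hk : k ≤ 32) :
    (List.range k).foldl
      (fun (st : Int × Int) (bit : Nat) =>
        if PySem.Int.band number ((1 : Int) <<< bit) ≠ 0 then
          (max (st.2 + 1) st.1, st.2 + 1)
        else
          (st.1, 0))
      (0, 0)
    = (((pvMX (pvM number) k : Nat) : Int), ((pvCC (pvM number) k : Nat) : Int)) := by
  induction k with
  | zero => simp [pvMX, pvCC]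
  | succ n ih =>
    rw [List.range_succ, List.foldl_append, ih (by omega), List.foldl_cons, List.foldl_nil]
    by_cases hb : (pvM number).testBit n = true
    · rw [if_pos ((pv_test number n (by omega)).mpr hb)]
      simp only [pvMX, pvCC, hb, if_pos]
      rw [Prod.mk.injEq]
      constructor
      · push_cast [Nat.cast_max]
        rw [max_comm]
      · push_cast
        rfl
    · rw [if_neg (by rw [pv_test number n (by omega)]; simpa using hb)]
      simp [pvMX, pvCC, hb]

-- B-side: one folding step and its iterates
def pvF (n : Nat) : Nat := n &&& (n >>> 1)

lemma pv_bitFold_eq (n : Nat) : bitFold n = if n = 0 then 0 else bitFold (pvF n) + 1 := by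
  rw [bitFold]; rfl

lemma pvF_zero : pvF 0 = 0 := rfl

lemma pv_iterate_bitFold (n : Nat) : pvF^[bitFold n] n = 0 := by
  induction n using bitFold.induct with
  | case1 => simp [pv_bitFold_eq]
  | case2 n h ih =>
    rw [pv_bitFold_eq, if_neg h, Function.iterate_succ_apply]
    exact ih

lemma pv_bitFold_le (k : Nat) : ∀ n, pvF^[k] n = 0 → bitFold n ≤ k := by
  induction k with
  | zero => intro n h; simp at h; simp [h, pv_bitFold_eq]
  | succ k ih =>
    intro n h
    rcases eq_or_ne n 0 with rfl | hn
    · simp [pv_bitFold_eq]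
    · rw [pv_bitFold_eq, if_neg hn]
      have := ih (pvF n) (by rwa [Function.iterate_succ_apply] at h)
      omega

lemma pv_iterate_mono (n k j : Nat) (hkj : k ≤ j) (h : pvF^[k] n = 0) : pvF^[j] n = 0 := by
  obtain ⟨t, rfl⟩ := Nat.exists_eq_add_of_le hkj
  rw [Nat.add_comm, Function.iterate_add_apply, h, Function.iterate_fixed pvF_zero]

lemma pvF_testBit (n i : Nat) : (pvF n).testBit i = (n.testBit i && n.testBit (i + 1)) := by
  rw [pvF, Nat.testBit_land, Nat.testBit_shiftRight]
  rw [Nat.add_comm]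

lemma pv_testBit_iterate (k : Nat) :
    ∀ n i, (pvF^[k] n).testBit i = true ↔ ∀ t, t ≤ k → n.testBit (i + t) = true := by
  induction k with
  | zero =>
    intro n i
    simp only [Function.iterate_zero, id]
    constructor
    · intro h t ht; interval_cases t; simpa using h
    · intro h; simpa using h 0 (by omega)
  | succ k ih =>
    intro n i
    rw [Function.iterate_succ_apply, ih (pvF n) i]
    constructor
    · intro h t ht
      rcases Nat.lt_or_ge t (k + 1) with h1 | h1
      · have h2 := h t (by omega)
        rw [pvF_testBit, Bool.and_eq_true] at h2
        exact h2.1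
      · have ht' : t = k + 1 := by omega
        subst ht'
        have h2 := h k (by omega)
        rw [pvF_testBit, Bool.and_eq_true] at h2
        have := h2.2
        rwa [show i + k + 1 = i + (k + 1) by omega] at this
    · intro h t ht
      rw [pvF_testBit, Bool.and_eq_true]
      refine ⟨h t (by omega), ?_⟩
      rw [show i + t + 1 = i + (t + 1) by omega]
      exact h (t + 1) (by omega)

-- run / state facts about pvCC and pvMX
lemma pvCC_le (m k : Nat) : pvCC m k ≤ k := by
  induction k with
  | zero => simp [pvCC]
  | succ k ih => rw [pvCC]; split <;> omega

lemma pvCC_le_pvMX (m k : Nat) : pvCC m k ≤ pvMX m k := by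
  induction k with
  | zero => simp [pvCC, pvMX]
  | succ k ih =>
    rw [pvCC, pvMX]
    split
    · exact le_max_left _ _
    · omega

lemma pvMX_step (m k : Nat) : pvMX m k ≤ pvMX m (k + 1) := by
  rw [pvMX]
  split
  · exact le_max_right _ _
  · exact le_refl _

lemma pvMX_mono (m j k : Nat) (h : j ≤ k) : pvMX m j ≤ pvMX m k := by
  induction k with
  | zero => have : j = 0 := by omega
            subst this; exact le_refl _
  | succ k ih =>
    rcases Nat.lt_or_ge j (k + 1) with h1 | h1
    · exact le_trans (ih (by omega)) (pvMX_step m k)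
    · have : j = k + 1 := by omega
      subst this; exact le_refl _

lemma pvCC_run (m k : Nat) : ∀ t, t < pvCC m k → m.testBit (k - pvCC m k + t) = true := by
  induction k with
  | zero => simp [pvCC]
  | succ k ih =>
    intro t ht
    rw [pvCC] at ht ⊢
    by_cases hb : m.testBit k = true
    · rw [if_pos hb] at ht ⊢
      have hle := pvCC_le m k
      rcases Nat.lt_or_ge t (pvCC m k) with h1 | h1
      · have := ih t h1
        rwa [show k + 1 - (pvCC m k + 1) + t = k - pvCC m k + t by omega]
      · have : t = pvCC m k := by omega
        subst this
        rwa [show k + 1 - (pvCC m k + 1) + pvCC m k = k by omega]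
    · rw [if_neg hb] at ht; omega

lemma pvCC_of_run (m : Nat) : ∀ r i, (∀ t, t ≤ r → m.testBit (i + t) = true) →
    r + 1 ≤ pvCC m (i + r + 1) := by
  intro r
  induction r with
  | zero =>
    intro i h
    have h0 := h 0 (by omega)
    rw [Nat.add_zero] at h0
    rw [show i + 0 + 1 = i + 1 by omega, pvCC, if_pos h0]
    omega
  | succ r ih =>
    intro i h
    have hlast := h (r + 1) (by omega)
    rw [show i + (r + 1) + 1 = (i + r + 1) + 1 by omega, pvCC,
      if_pos (by rwa [show i + r + 1 = i + (r + 1) by omega])]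
    have := ih i (fun t ht => h t (by omega))
    omega

lemma pvMX_run (m : Nat) (k : Nat) (h : 0 < pvMX m k) :
    ∃ i, i + pvMX m k ≤ k ∧ ∀ t, t < pvMX m k → m.testBit (i + t) = true := by
  induction k with
  | zero => simp [pvMX] at h
  | succ k ih =>
    by_cases hb : m.testBit k = true
    · rw [pvMX, if_pos hb] at h ⊢
      rcases Nat.le_total (pvCC m k + 1) (pvMX m k) with h1 | h1
      · rw [max_eq_right h1] at h ⊢
        obtain ⟨i, hik, hrun⟩ := ih h
        exact ⟨i, by omega, hrun⟩
      · rw [max_eq_left h1] at h ⊢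
        refine ⟨k - pvCC m k, ?_, ?_⟩
        · have := pvCC_le m k
          omega
        · intro t ht
          rcases Nat.lt_or_ge t (pvCC m k) with h2 | h2
          · exact pvCC_run m k t h2
          · have heq : t = pvCC m k := by omega
            subst heq
            have := pvCC_le m k
            rwa [show k - pvCC m k + pvCC m k = k by omega]
    · rw [pvMX, if_neg hb] at h ⊢
      obtain ⟨i, hik, hrun⟩ := ih h
      exact ⟨i, by omega, hrun⟩

-- B's loop computes the maximum run length of the 32-bit masked value
lemma pv_bitFold_eq_pvMX (number : Int) : bitFold (pvM number) = pvMX (pvM number) 32 := by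
  have hm := pvM_lt number
  apply le_antisymm
  · -- bitFold ≤ mxv: iterating pvF (mxv 32) times kills every bit
    apply pv_bitFold_le
    apply Nat.eq_of_testBit_eq
    intro i
    rw [Nat.zero_testBit]
    by_contra hne
    have hbit : (pvF^[pvMX (pvM number) 32] (pvM number)).testBit i = true := by
      cases hx : (pvF^[pvMX (pvM number) 32] (pvM number)).testBit i
      · exact absurd hx hne
      · rfl
    rw [pv_testBit_iterate] at hbit
    set r := pvMX (pvM number) 32 with hr
    have htop := hbit r (by omega)
    have hlt : i + r < 32 := by
      by_contra hge
      have : pvM number < 2 ^ (i + r) :=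
        lt_of_lt_of_le hm (Nat.pow_le_pow_right (by omega) (by omega))
      rw [Nat.testBit_lt_two_pow this] at htop
      exact Bool.false_ne_true htop
    have hcc := pvCC_of_run (pvM number) r i hbit
    have h1 := pvCC_le_pvMX (pvM number) (i + r + 1)
    have h2 := pvMX_mono (pvM number) (i + r + 1) 32 (by omega)
    omega
  · -- mxv ≤ bitFold: a maximal run survives (r - 1) folding steps
    set r := pvMX (pvM number) 32 with hr
    rcases Nat.eq_zero_or_pos r with h0 | hpos
    · omega
    obtain ⟨i, _, hrun⟩ := pvMX_run (pvM number) 32 hpos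
    by_contra hlt
    rw [Nat.not_le] at hlt
    have hz : pvF^[r - 1] (pvM number) = 0 :=
      pv_iterate_mono _ _ _ (by omega) (pv_iterate_bitFold (pvM number))
    have : (pvF^[r - 1] (pvM number)).testBit i = true := by
      rw [pv_testBit_iterate]
      intro t ht
      exact hrun t (by omega)
    rw [hz, Nat.zero_testBit] at this
    exact Bool.false_ne_true this

-- ===== VERDICT (by name: the statement is the Claim_ definition above) =====
theorem count_contiguous_spec : Claim_equal_count_contiguous := by
  intro number _
  unfold Spec_count_contiguous count_contiguous count_contiguous_alt
  rw [pv_foldA number 32 (by omega)]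
  rw [show (PySem.Int.band number 4294967295).toNat = pvM number from rfl]
  rw [pv_bitFold_eq_pvMX]
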